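-- pv_equiv track=rewrite | github.com/danielgarzonotero/PepMNet | src/utils.py | get_aminoacids_2
-- ===== SOURCE A (Python) =====
-- def get_aminoacids_2(peptide):
--     """
--     This function processes a peptide sequence by performing several string manipulations:
--     The function returns a list of amino acids or sequence components, preserving the intended structure of the peptide.
--     Args:
--     peptide (str): The input peptide sequence.
--
--     Returns:
--     list: A list of processed amino acids or modifications.
--     """
--     sequence = peptide.replace("(ac)", "[ac]*").replace("_", "").replace("1", "").replace("2", "").replace("3", "").replace("4", "")
--     sequence_helm = "".join(sequence)
--
--     sequence_helm = ''.join([c + '.' if c.isupper() else c for c in sequence_helm])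
--     sequence_helm = sequence_helm.rstrip('.')
--
--     # Crear una lista a partir de la cadena resultante separada por puntos
--     sequence_list = sequence_helm.split('.')
--
--     # Reemplazar "_" por "." en cada elemento de la lista
--     sequence_list = [elem.replace('*', '.') for elem in sequence_list]
--
--     return sequence_list
-- ===== SOURCE B (Python) =====
-- def get_aminoacids_2(peptide):
--     seq = peptide.replace("(ac)", "[ac]*").replace("_", "").replace("1", "").replace("2", "").replace("3", "").replace("4", "")
--     tokens = []
--     cur = ""
--     for c in seq:
--         if c.isupper():
--             tokens.append(cur + c)
--             cur = ""
--         elif c == '.':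
--             tokens.append(cur)
--             cur = ""
--         elif c == '*':
--             cur += '.'
--         else:
--             cur += c
--     tokens.append(cur)
--     while tokens and tokens[-1] == "":
--         tokens.pop()
--     return tokens if tokens else ['']
-- ===== Notes on version B (the rewrite author's own statement) =====
-- stated objective: alternative
-- what changed: Replaces A's build-a-delimited-string pipeline (join with inserted separators, rstrip, split, per-element replace) with a single left-to-right tokenizing scan over the preprocessed sequence that flushes tokens at uppercase letters and literal separators, rewrites the modification marker on the fly, and finally drops trailing empty tokens.
import Mathlib
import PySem

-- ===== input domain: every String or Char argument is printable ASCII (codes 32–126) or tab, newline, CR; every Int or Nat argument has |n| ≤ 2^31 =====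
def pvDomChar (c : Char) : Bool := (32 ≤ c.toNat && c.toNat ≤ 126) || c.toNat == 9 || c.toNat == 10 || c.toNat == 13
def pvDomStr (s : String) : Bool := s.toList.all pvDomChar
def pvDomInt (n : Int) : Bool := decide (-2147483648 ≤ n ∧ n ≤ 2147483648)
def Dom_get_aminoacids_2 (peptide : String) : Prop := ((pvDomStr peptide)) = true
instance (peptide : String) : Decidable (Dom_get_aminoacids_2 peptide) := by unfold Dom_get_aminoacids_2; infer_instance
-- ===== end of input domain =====

-- B replaces A's delimited-string pipeline (join with inserted dots, rstrip, split, per-element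
-- replace) with one tokenizing scan; objective: alternative decomposition, same cost.

-- ===== PORT A =====
def get_aminoacids_2 (peptide : String) : List String :=
  let sequence : List Char :=
    (PySem.Str.replace (PySem.Str.replace (PySem.Str.replace (PySem.Str.replace
      (PySem.Str.replace (PySem.Str.replace peptide "(ac)" "[ac]*") "_" "")
      "1" "") "2" "") "3" "") "4" "").toList
  -- sequence_helm = "".join(sequence) is the identity on a string
  let sequence_helm : List Char :=
    PySem.Chars.join [] (sequence.map (fun c => if PySem.Chars.isupper c then [c, '.'] else [c]))
  -- .rstrip('.') : drop the trailing run of '.' characters (exact hand port)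
  let sequence_helm := (sequence_helm.reverse.dropWhile (· == '.')).reverse
  let sequence_list := PySem.Chars.splitOn sequence_helm ['.']
  let sequence_list := sequence_list.map (fun e => PySem.Chars.replace e ['*'] ['.'])
  sequence_list.map (fun cs => String.ofList cs)

-- ===== PORT B =====
def get_aminoacids_2_alt (peptide : String) : List String :=
  let seq : List Char :=
    (PySem.Str.replace (PySem.Str.replace (PySem.Str.replace (PySem.Str.replace
      (PySem.Str.replace (PySem.Str.replace peptide "(ac)" "[ac]*") "_" "")
      "1" "") "2" "") "3" "") "4" "").toList
  let r := seq.foldl (fun (st : List (List Char) × List Char) (c : Char) =>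
      if PySem.Chars.isupper c then (st.1 ++ [st.2 ++ [c]], [])
      else if c = '.' then (st.1 ++ [st.2], [])
      else if c = '*' then (st.1, st.2 ++ ['.'])
      else (st.1, st.2 ++ [c])) ([], [])
  let tokens := r.1 ++ [r.2]
  -- while tokens and tokens[-1] == "": tokens.pop()  (exact hand port)
  let tokens := (tokens.reverse.dropWhile (· == [])).reverse
  if tokens = [] then [""] else tokens.map (fun cs => String.ofList cs)

-- ===== PRECONDITION & SPEC =====
def Spec_get_aminoacids_2 (peptide : String) (out : List String) : Prop := out = get_aminoacids_2_alt peptide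
instance (peptide : String) (out : List String) : Decidable (Spec_get_aminoacids_2 peptide out) := by unfold Spec_get_aminoacids_2; infer_instance

-- ===== CLAIM (what is proved, stated in full; the proofs are below) =====
def Claim_equal_get_aminoacids_2 : Prop := ∀ (peptide : String), Dom_get_aminoacids_2 peptide → Spec_get_aminoacids_2 peptide (get_aminoacids_2 peptide)

-- ===== LEMMAS AND PROOFS =====

-- f : the per-char expansion A's comprehension performs
def pvF (c : Char) : List Char := if PySem.Chars.isupper c then [c, '.'] else [c]
-- sub : the per-char effect of .replace('*', '.')
def pvSub (c : Char) : Char := if c == '*' then '.' else c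

-- prepend p to the first piece
def pvCons1 (p : List Char) : List (List Char) → List (List Char)
  | [] => [p]
  | h :: t => (p ++ h) :: t

-- split on '.'
def pvSplitDots : List Char → List (List Char)
  | [] => [[]]
  | c :: t => if c = '.' then [] :: pvSplitDots t else pvCons1 [c] (pvSplitDots t)

theorem pvSplitDots_ne_nil (s : List Char) : pvSplitDots s ≠ [] := by
  cases s with
  | nil => simp [pvSplitDots]
  | cons c t =>
    simp only [pvSplitDots]
    split
    · simp
    · cases h : pvSplitDots t <;> simp [pvCons1]

theorem pvCons1_nil_of_ne (l : List (List Char)) (h : l ≠ []) : pvCons1 [] l = l := by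
  cases l with
  | nil => exact absurd rfl h
  | cons a t => simp [pvCons1]

theorem pvCons1_pvCons1 (p q : List Char) (l : List (List Char)) (h : l ≠ []) :
    pvCons1 p (pvCons1 q l) = pvCons1 (p ++ q) l := by
  cases l with
  | nil => exact absurd rfl h
  | cons a t => simp [pvCons1]

theorem pvCons1_append (p : List Char) (l m : List (List Char)) (h : l ≠ []) :
    pvCons1 p (l ++ m) = pvCons1 p l ++ m := by
  cases l with
  | nil => exact absurd rfl h
  | cons a t => simp [pvCons1]

-- join with an empty separator is flatten
theorem pvJoin_nil_flatten (xs : List (List Char)) : PySem.Chars.join [] xs = xs.flatten := by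
  induction xs with
  | nil => rfl
  | cons x t ih =>
    cases t with
    | nil => simp [PySem.Chars.join, List.intercalate]
    | cons y u =>
      simp only [PySem.Chars.join, List.intercalate] at *
      simp_all [List.intersperse]

-- PySem.Chars.splitOn on the one-char separator '.' is pvSplitDots
theorem pvSplitOn_go (fuel : Nat) (l cur : List Char) (acc : List (List Char))
    (h : l.length ≤ fuel) :
    PySem.Chars.splitOn.go ['.'] fuel l cur acc
      = acc.reverse ++ pvCons1 cur.reverse (pvSplitDots l) := by
  induction fuel generalizing l cur acc with
  | zero =>
    cases l with
    | nil => simp [PySem.Chars.splitOn.go, pvSplitDots, pvCons1]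
    | cons c t => simp at h
  | succ n ih =>
    cases l with
    | nil => simp [PySem.Chars.splitOn.go, pvSplitDots, pvCons1]
    | cons c t =>
      simp only [PySem.Chars.splitOn.go]
      by_cases hc : c = '.'
      · subst hc
        have hp : List.isPrefixOf ['.'] ('.' :: t) = true := by simp [List.isPrefixOf]
        rw [if_pos hp]
        simp only [List.length_cons] at h
        rw [show List.drop (['.'] : List Char).length ('.' :: t) = t from rfl]
        rw [ih t [] ((List.reverse cur) :: acc) (by omega)]
        obtain ⟨a, b, hq⟩ := List.exists_cons_of_ne_nil (pvSplitDots_ne_nil t)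
        simp [pvSplitDots, pvCons1, hq]
      · have hp : List.isPrefixOf ['.'] (c :: t) = false := by
          simp [List.isPrefixOf]; exact fun hh => hc hh.symm
        rw [if_neg (by simp [hp])]
        simp only [List.length_cons] at h
        rw [ih t (c :: cur) acc (by omega)]
        simp only [pvSplitDots, if_neg hc, List.reverse_cons]
        rw [pvCons1_pvCons1 _ _ _ (pvSplitDots_ne_nil t)]

theorem pvSplitOn_eq (s : List Char) : PySem.Chars.splitOn s ['.'] = pvSplitDots s := by
  unfold PySem.Chars.splitOn
  rw [pvSplitOn_go (s.length + 1) s [] [] (by omega)]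
  simp [pvCons1_nil_of_ne _ (pvSplitDots_ne_nil s)]

-- replace with one-char old and new is a map
theorem pvReplace_go (fuel : Nat) (l acc : List Char) (h : l.length ≤ fuel) :
    PySem.Chars.replace.go ['*'] ['.'] fuel l acc = acc.reverse ++ l.map pvSub := by
  induction fuel generalizing l acc with
  | zero =>
    cases l with
    | nil => simp [PySem.Chars.replace.go]
    | cons c t => simp at h
  | succ n ih =>
    cases l with
    | nil => simp [PySem.Chars.replace.go]
    | cons c t =>
      simp only [PySem.Chars.replace.go]
      simp only [List.length_cons] at h
      by_cases hc : c = '*'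
      · subst hc
        have hp : List.isPrefixOf ['*'] ('*' :: t) = true := by simp [List.isPrefixOf]
        rw [if_pos hp]
        rw [show List.drop (['*'] : List Char).length ('*' :: t) = t from rfl]
        rw [ih t _ (by omega)]
        simp [pvSub]
      · have hp : List.isPrefixOf ['*'] (c :: t) = false := by
          simp [List.isPrefixOf]; exact fun hh => hc hh.symm
        rw [if_neg (by simp [hp])]
        rw [ih t _ (by omega)]
        simp [pvSub, hc]

theorem pvReplace_eq (e : List Char) : PySem.Chars.replace e ['*'] ['.'] = e.map pvSub := by
  unfold PySem.Chars.replace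
  rw [if_neg (by simp)]
  exact pvReplace_go e.length e [] le_rfl

-- the split of t ++ '.' :: u is the splits of t and u
theorem pvSplitDots_append_dot (t u : List Char) :
    pvSplitDots (t ++ '.' :: u) = pvSplitDots t ++ pvSplitDots u := by
  induction t with
  | nil => simp [pvSplitDots]
  | cons c t ih =>
    by_cases hc : c = '.'
    · subst hc; simp [pvSplitDots, ih]
    · simp only [List.cons_append, pvSplitDots, if_neg hc, ih]
      rw [pvCons1_append _ _ _ (pvSplitDots_ne_nil t)]

-- a snoc with a non-dot char ends the split in a nonempty piece
theorem pvSplitDots_snoc (t : List Char) (c : Char) (hc : c ≠ '.') :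
    ∃ X e, pvSplitDots (t ++ [c]) = X ++ [e ++ [c]] := by
  induction t with
  | nil => exact ⟨[], [], by simp [pvSplitDots, if_neg hc, pvCons1]⟩
  | cons d t ih =>
    obtain ⟨X, e, hXe⟩ := ih
    by_cases hd : d = '.'
    · subst hd; exact ⟨[] :: X, e, by simp [pvSplitDots, hXe]⟩
    · simp only [List.cons_append, pvSplitDots, if_neg hd, hXe]
      cases X with
      | nil => exact ⟨[], d :: e, by simp [pvCons1]⟩
      | cons h X' => exact ⟨([d] ++ h) :: X', e, by simp [pvCons1]⟩

-- the runTokens scan (B's loop, in recursive form)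
def pvRun : List Char → List Char → List (List Char)
  | [], cur => [cur]
  | c :: cs, cur =>
    if PySem.Chars.isupper c then (cur ++ [c]) :: pvRun cs []
    else if c = '.' then cur :: pvRun cs []
    else if c = '*' then pvRun cs (cur ++ ['.'])
    else pvRun cs (cur ++ [c])

theorem pvFoldl_run (cs : List Char) (toks : List (List Char)) (cur : List Char) :
    (cs.foldl (fun (st : List (List Char) × List Char) (c : Char) =>
      if PySem.Chars.isupper c then (st.1 ++ [st.2 ++ [c]], [])
      else if c = '.' then (st.1 ++ [st.2], [])
      else if c = '*' then (st.1, st.2 ++ ['.'])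
      else (st.1, st.2 ++ [c])) (toks, cur)).1
    ++ [(cs.foldl (fun (st : List (List Char) × List Char) (c : Char) =>
      if PySem.Chars.isupper c then (st.1 ++ [st.2 ++ [c]], [])
      else if c = '.' then (st.1 ++ [st.2], [])
      else if c = '*' then (st.1, st.2 ++ ['.'])
      else (st.1, st.2 ++ [c])) (toks, cur)).2]
    = toks ++ pvRun cs cur := by
  induction cs generalizing toks cur with
  | nil => simp [pvRun]
  | cons c cs ih =>
    simp only [List.foldl_cons, pvRun]
    by_cases hu : PySem.Chars.isupper c
    · simp only [if_pos hu, ih]; simp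
    · simp only [if_neg hu]
      by_cases hd : c = '.'
      · simp only [if_pos hd, ih]; simp
      · by_cases hs : c = '*'
        · simp only [if_neg hd, if_pos hs, ih]
        · simp only [if_neg hd, if_neg hs, ih]

-- the scan computes exactly the mapped split of the dotted string
theorem pvRun_eq (cs : List Char) (cur : List Char) :
    pvRun cs cur = pvCons1 cur ((pvSplitDots (cs.flatMap pvF)).map (fun e => e.map pvSub)) := by
  induction cs generalizing cur with
  | nil => simp [pvRun, pvSplitDots, pvCons1]
  | cons c cs ih =>
    obtain ⟨a, t, h⟩ := List.exists_cons_of_ne_nil (pvSplitDots_ne_nil (cs.flatMap pvF))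
    by_cases hu : PySem.Chars.isupper c
    · have hc : c ≠ '.' := by rintro rfl; simp [PySem.Chars.isupper] at hu
      have hs : c ≠ '*' := by rintro rfl; simp [PySem.Chars.isupper] at hu
      simp [pvRun, pvF, pvSplitDots, hu, hc, hs, ih, h, pvCons1, pvSub]
    · by_cases hd : c = '.'
      · subst hd
        simp [pvRun, pvF, pvSplitDots, hu, ih, h, pvCons1]
      · by_cases hs : c = '*'
        · subst hs
          simp [pvRun, pvF, pvSplitDots, hu, hd, ih, h, pvCons1, pvSub]
        · simp [pvRun, pvF, pvSplitDots, hu, hd, hs, ih, h, pvCons1, pvSub]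

-- rstrip('.')-then-split equals split-then-drop-trailing-empties (with the all-empty special case)
theorem pvStrip_split (s : List Char) :
    pvSplitDots ((s.reverse.dropWhile (· == '.')).reverse)
      = (if ((pvSplitDots s).reverse.dropWhile (· == [])).reverse = [] then [[]]
         else ((pvSplitDots s).reverse.dropWhile (· == [])).reverse) := by
  induction s using List.reverseRecOn with
  | nil => simp [pvSplitDots]
  | append_singleton t c ih =>
    by_cases hc : c = '.'
    · subst hc
      have h1 : (t ++ ['.']).reverse.dropWhile (· == '.') = t.reverse.dropWhile (· == '.') := by
        rw [List.reverse_append]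
        simp
      have h2 : pvSplitDots (t ++ ['.']) = pvSplitDots t ++ [[]] := by
        have := pvSplitDots_append_dot t []
        simpa [pvSplitDots] using this
      have h3 : (pvSplitDots t ++ [[]]).reverse.dropWhile (· == [])
          = (pvSplitDots t).reverse.dropWhile (· == []) := by
        rw [List.reverse_append]
        simp
      rw [h1, h2, h3]
      exact ih
    · have h1 : ((t ++ [c]).reverse.dropWhile (· == '.')).reverse = t ++ [c] := by
        rw [List.reverse_append]
        simp [hc]
      rw [h1]
      obtain ⟨X, e, hXe⟩ := pvSplitDots_snoc t c hc
      rw [hXe]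
      have h2 : ((X ++ [e ++ [c]]).reverse.dropWhile (· == [])).reverse = X ++ [e ++ [c]] := by
        rw [List.reverse_append]
        simp
      rw [h2, if_neg (by simp)]

-- dropping trailing empty pieces commutes with the per-piece pvSub map
theorem pvDrop_map (l : List (List Char)) :
    (l.map (fun e => e.map pvSub)).dropWhile (· == [])
      = (l.dropWhile (· == [])).map (fun e => e.map pvSub) := by
  induction l with
  | nil => simp
  | cons a t ih =>
    by_cases ha : a = []
    · subst ha; simpa [List.dropWhile_cons] using ih
    · simp [ha]

-- ===== VERDICT (by name: the statement is the Claim_ definition above) =====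
theorem get_aminoacids_2_spec : Claim_equal_get_aminoacids_2 := by
  intro peptide _
  unfold Spec_get_aminoacids_2 get_aminoacids_2 get_aminoacids_2_alt
  generalize (PySem.Str.replace (PySem.Str.replace (PySem.Str.replace (PySem.Str.replace
      (PySem.Str.replace (PySem.Str.replace peptide "(ac)" "[ac]*") "_" "")
      "1" "") "2" "") "3" "") "4" "").toList = cs
  simp only []
  rw [pvFoldl_run cs [] [], List.nil_append, pvRun_eq cs []]
  rw [pvCons1_nil_of_ne _ (by simpa using pvSplitDots_ne_nil (cs.flatMap pvF))]
  have hjoin : PySem.Chars.join []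
      (cs.map (fun c => if PySem.Chars.isupper c then [c, '.'] else [c])) = cs.flatMap pvF := by
    rw [pvJoin_nil_flatten, List.flatMap_def]
    rfl
  rw [hjoin, pvSplitOn_eq, pvStrip_split (cs.flatMap pvF)]
  have hcomm : (((pvSplitDots (cs.flatMap pvF)).map (fun e => e.map pvSub)).reverse.dropWhile
        (· == [])).reverse
      = (((pvSplitDots (cs.flatMap pvF)).reverse.dropWhile (· == [])).reverse).map
          (fun e => e.map pvSub) := by
    rw [← List.map_reverse, pvDrop_map, List.map_reverse]
  rw [hcomm]
  set E := ((pvSplitDots (cs.flatMap pvF)).reverse.dropWhile (· == [])).reverse with hE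
  by_cases hEnil : E = []
  · simp [hEnil, pvReplace_eq]
  · rw [if_neg hEnil, if_neg (by simpa [List.map_eq_nil_iff] using hEnil)]
    simp [pvReplace_eq]
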